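-- pv_equiv track=rewrite | github.com/Henning-Mueller/Modifizierter-logic-gate-simulator | standalone_expression_rendering.py | bNotCount
-- ===== SOURCE A (Python) =====
-- NOT = "~"
--
-- def bNotCount(string) -> int:
--     '''
--     Returns the number of NOTs at the start of the string.
--
--     If none are found, returns 0.
--     This function does not test "string" to see if it is a valid binary expression.
--     '''
--     notCount = 0
--     for c in string:
--         if c == NOT:
--             notCount += 1
--         else:
--             return notCount
--     return notCount
-- ===== SOURCE B (Python) =====
-- NOT = "~"
--
-- def bNotCount(string) -> int:
--     '''Number of leading NOT ('~') characters, computed by stripping them and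
--     measuring the length reduction.'''
--     return len(string) - len(string.lstrip(NOT))
-- ===== Notes on version B (the rewrite author's own statement) =====
-- stated objective: idiomatic
-- what changed: Replaces the explicit counting loop with early return by a single expression: len(string) - len(string.lstrip('~')).
import Mathlib
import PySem

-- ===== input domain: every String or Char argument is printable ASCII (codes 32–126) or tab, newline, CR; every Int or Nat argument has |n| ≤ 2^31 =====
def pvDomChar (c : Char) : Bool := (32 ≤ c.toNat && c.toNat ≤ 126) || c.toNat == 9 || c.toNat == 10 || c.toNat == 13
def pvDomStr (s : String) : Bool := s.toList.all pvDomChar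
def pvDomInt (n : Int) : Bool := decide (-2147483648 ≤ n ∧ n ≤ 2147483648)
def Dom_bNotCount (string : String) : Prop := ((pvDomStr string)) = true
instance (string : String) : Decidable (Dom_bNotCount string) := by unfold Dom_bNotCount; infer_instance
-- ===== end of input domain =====

-- B replaces A's explicit counting loop (with early return) by a single expression:
-- len(string) - len(string.lstrip('~')); same O(n) cost, more idiomatic.

-- ===== PORT A =====
-- the for-loop with early return: accumulator notCount, stop at the first non-'~'
def bNotCountLoop : List Char → Int → Int
  | [], notCount => notCount
  | c :: rest, notCount =>
      if c == '~' then bNotCountLoop rest (notCount + 1) else notCount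

def bNotCount (string : String) : Int := bNotCountLoop string.toList 0

-- ===== PORT B =====
-- string.lstrip("~") for the single-character strip set "~" is exactly
-- dropWhile (· == '~') on the code points (PySem has no lstrip-with-chars primitive).
def bNotCount_alt (string : String) : Int :=
  (string.toList.length : Int) - ((string.toList.dropWhile (fun c => c == '~')).length : Int)

-- ===== PRECONDITION & SPEC =====
def Spec_bNotCount (string : String) (out : Int) : Prop := out = bNotCount_alt string
instance (string : String) (out : Int) : Decidable (Spec_bNotCount string out) := by unfold Spec_bNotCount; infer_instance

-- ===== CLAIM (what is proved, stated in full; the proofs are below) =====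
def Claim_equal_bNotCount : Prop := ∀ (string : String), Dom_bNotCount string → Spec_bNotCount string (bNotCount string)

-- ===== LEMMAS AND PROOFS =====
theorem bNotCountLoop_eq (l : List Char) (acc : Int) :
    bNotCountLoop l acc = acc + ((l.length : Int) - ((l.dropWhile (fun c => c == '~')).length : Int)) := by
  induction l generalizing acc with
  | nil => simp [bNotCountLoop]
  | cons c rest ih =>
    by_cases h : c = '~'
    · have hle : (rest.dropWhile (fun c => c == '~')).length ≤ rest.length :=
        List.length_dropWhile_le _ _
      simp [bNotCountLoop, h, List.dropWhile, ih]
      omega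
    · have hb : (c == '~') = false := by simp [h]
      simp [bNotCountLoop, List.dropWhile, hb]

-- ===== VERDICT (by name: the statement is the Claim_ definition above) =====
theorem bNotCount_spec : Claim_equal_bNotCount := by
  intro s _
  unfold Spec_bNotCount bNotCount bNotCount_alt
  rw [bNotCountLoop_eq]
  omega
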